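-- pv_equiv track=rewrite | github.com/uds-se/fuzzingbook | docs/code/Parser.py | find_comma
-- ===== SOURCE A (Python) =====
-- def parse_quote(string, i):
--     v = string[i + 1:].find('"')
--     return v + i + 1 if v >= 0 else -1
--
-- def find_comma(string, i):
--     slen = len(string)
--     while i < slen:
--         if string[i] == '"':
--             i = parse_quote(string, i)
--             if i == -1:
--                 return -1
--         if string[i] == ',':
--             return i
--         i += 1
--     return -1
-- ===== SOURCE B (Python) =====
-- def find_comma(string, i):
--     in_quote = False
--     slen = len(string)
--     while i < slen:
--         c = string[i]
--         if c == '"':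
--             in_quote = not in_quote
--         elif c == ',' and not in_quote:
--             return i
--         i += 1
--     return -1
-- ===== Notes on version B (the rewrite author's own statement) =====
-- stated objective: simpler
-- what changed: Replaces A's parse_quote helper, which jumps over quoted spans with str.find, by a single uniform per-character loop that tracks quote parity in an in_quote flag.
-- outside the precondition, e.g. on find_comma('",', -2): A returns -1, B returns 1
import Mathlib
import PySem

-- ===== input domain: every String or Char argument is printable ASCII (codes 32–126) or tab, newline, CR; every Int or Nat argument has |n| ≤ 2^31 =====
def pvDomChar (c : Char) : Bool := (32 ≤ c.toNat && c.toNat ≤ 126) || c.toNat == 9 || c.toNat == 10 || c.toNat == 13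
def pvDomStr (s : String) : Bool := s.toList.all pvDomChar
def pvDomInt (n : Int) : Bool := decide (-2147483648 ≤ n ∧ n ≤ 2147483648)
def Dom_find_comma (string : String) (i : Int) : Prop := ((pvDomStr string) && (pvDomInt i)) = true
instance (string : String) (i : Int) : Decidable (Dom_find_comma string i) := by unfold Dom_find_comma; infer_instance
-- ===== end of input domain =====

-- B replaces A's find-based jumping over quoted spans by a single character scan with an
-- in_quote parity flag (simpler; no helper, one uniform loop, no claim of speed).

-- ===== PORT A =====
-- parse_quote: v = string[i+1:].find('"'); return v + i + 1 if v >= 0 else -1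
def parse_quote (s : List Char) (i : Int) : Int :=
  let v := PySem.Chars.find (PySem.List.slice s (some (i + 1)) none) ['"']
  if v ≥ 0 then v + i + 1 else -1

-- parse_quote either fails (-1) or jumps forward; used only for termination of the loop below
theorem parse_quote_ge (s : List Char) (i : Int) :
    parse_quote s i = -1 ∨ i + 1 ≤ parse_quote s i := by
  unfold parse_quote
  by_cases h : PySem.Chars.find (PySem.List.slice s (some (i + 1)) none) ['"'] ≥ 0
  · simp only [if_pos h]; omega
  · simp only [if_neg h]; exact Or.inl trivial

-- the while-loop of A, step for step (string[x] = PySem.List.pyGet?; none = IndexError, Python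
-- would raise there — the port returns -1 in that unreachable-inside-Pre_ arm)
def find_comma_goA (s : List Char) (i : Int) : Int :=
  if _h : i < (s.length : Int) then
    if PySem.List.pyGet? s i = some '"' then
      let j := parse_quote s i
      if _hj : j = -1 then -1
      else
        if PySem.List.pyGet? s j = some ',' then j
        else find_comma_goA s (j + 1)
    else
      if PySem.List.pyGet? s i = some ',' then i
      else find_comma_goA s (i + 1)
  else -1
termination_by ((s.length : Int) - i).toNat
decreasing_by
  · have := parse_quote_ge s i; omega
  · omega

def find_comma (string : String) (i : Int) : Int :=
  find_comma_goA string.toList i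

-- ===== PORT B =====
-- the single while-loop of B with the in_quote flag
def find_comma_goB (s : List Char) (i : Int) (in_quote : Bool) : Int :=
  if _h : i < (s.length : Int) then
    match PySem.List.pyGet? s i with
    | some c =>
        if c = '"' then find_comma_goB s (i + 1) (!in_quote)
        else if c = ',' ∧ in_quote = false then i
        else find_comma_goB s (i + 1) in_quote
    | none => -1   -- Python raises IndexError here (i < -len); unreachable inside Pre_
  else -1
termination_by ((s.length : Int) - i).toNat
decreasing_by all_goals omega

def find_comma_alt (string : String) (i : Int) : Int :=
  find_comma_goB string.toList i false

-- ===== PRECONDITION & SPEC =====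
-- Pre_ excludes negative start indices i: there A raises IndexError for i < -len(string), and for
-- -len ≤ i < 0 A's scan through negative-index wraparound (and parse_quote's end-relative slice)
-- is an accident of Python indexing on an internal helper that is only ever called with i ≥ 0.
def Pre_find_comma (string : String) (i : Int) : Prop := 0 ≤ i
instance (string : String) (i : Int) : Decidable (Pre_find_comma string i) := by
  unfold Pre_find_comma; infer_instance

def pvWitness_find_comma : String × Int := ("\"a,b\",c", 0)

def Spec_find_comma (string : String) (i : Int) (out : Int) : Prop := out = find_comma_alt string i
instance (string : String) (i : Int) (out : Int) : Decidable (Spec_find_comma string i out) := by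
  unfold Spec_find_comma; infer_instance

-- ===== CLAIM (what is proved, stated in full; the proofs are below) =====
def Claim_equal_find_comma : Prop := ∀ (string : String) (i : Int), Dom_find_comma string i → Pre_find_comma string i → Spec_find_comma string i (find_comma string i)

-- ===== LEMMAS AND PROOFS =====

-- a one-element list is a prefix of l.drop m iff l[m]? is that element
theorem singleton_prefix_drop {c : Char} {l : List Char} {m : Nat} :
    [c] <+: l.drop m ↔ l[m]? = some c := by
  rw [← List.head?_drop]
  cases l.drop m with
  | nil => simp
  | cons a t => simp [List.cons_prefix_cons, eq_comm]

-- B's loop with the flag on skips over a quote-free stretch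
theorem goB_skip (s : List Char) (d : Nat) : ∀ (k : Nat), k + d ≤ s.length →
    (∀ m, k ≤ m → m < k + d → s[m]? ≠ some '"') →
    find_comma_goB s k true = find_comma_goB s (k + d) true := by
  induction d with
  | zero => intro k _ _; rfl
  | succ d ih =>
      intro k hlen hq
      have hk : (k : Int) < (s.length : Int) := by omega
      have hget : PySem.List.pyGet? s (k : Int) = s[k]? := PySem.List.pyGet?_natCast s k
      have hkx : k < s.length := by omega
      obtain ⟨c, hc⟩ : ∃ c, s[k]? = some c := ⟨s[k], List.getElem?_eq_getElem hkx⟩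
      have hcq : c ≠ '"' := by
        intro h; exact hq k Nat.le.refl (by omega) (by simpa [h] using hc)
      rw [find_comma_goB]
      simp only [hk, dif_pos, hget, hc]
      rw [if_neg hcq, if_neg (by simp)]
      have : (k : Int) + 1 = ((k + 1 : Nat) : Int) := by push_cast; ring
      rw [this, ih (k + 1) (by omega) (fun m h1 h2 => hq m (by omega) (by omega))]
      congr 1; push_cast; ring

-- main equivalence, on natural start positions
theorem goA_eq_goB (s : List Char) (n : Nat) :
    find_comma_goA s (n : Int) = find_comma_goB s (n : Int) false := by
  by_cases hn : n < s.length
  case neg =>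
    rw [find_comma_goA, find_comma_goB]
    simp only [dif_neg (by omega : ¬ ((n : Int) < (s.length : Int)))]
  case pos =>
    have hget : PySem.List.pyGet? s (n : Int) = s[n]? := PySem.List.pyGet?_natCast s n
    obtain ⟨c, hc⟩ : ∃ c, s[n]? = some c := ⟨s[n], List.getElem?_eq_getElem hn⟩
    have hn' : (n : Int) < (s.length : Int) := by omega
    by_cases hcq : c = '"'
    case neg =>
      rw [find_comma_goA, find_comma_goB]
      simp only [dif_pos hn', hget, hc, if_neg hcq, Option.some.injEq]
      by_cases hcc : c = ','
      · simp [hcc]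
      · rw [if_neg hcc, if_neg (by simp [hcc])]
        have h1 : (n : Int) + 1 = ((n + 1 : Nat) : Int) := by push_cast; ring
        rw [h1, goA_eq_goB s (n + 1)]
    case pos =>
      -- quote case
      subst hcq
      have hslice : PySem.List.slice s (some ((n : Int) + 1)) none = s.drop (n + 1) := by
        have hcast : ((n : Int) + 1).toNat = n + 1 := by omega
        rw [PySem.List.slice_from s (by omega : (0:Int) ≤ (n : Int) + 1), hcast]
      set v := PySem.Chars.find (s.drop (n + 1)) ['"'] with hv
      have hpq : parse_quote s (n : Int) = if v ≥ 0 then v + n + 1 else -1 := by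
        unfold parse_quote; rw [hslice]
      by_cases hvn : v ≥ 0
      case pos =>
        -- closing quote found at jn = n + 1 + v
        obtain ⟨hpre, hmin⟩ := PySem.Chars.find_spec (s := s.drop (n + 1)) (sub := ['"']) hvn
        set vn := v.toNat with hvn'
        set jn := n + 1 + vn with hjn
        have hdd : (s.drop (n + 1)).drop vn = s.drop jn := by
          rw [List.drop_drop]
        have hjq : s[jn]? = some '"' := by
          rw [← singleton_prefix_drop, ← hdd]; exact hpre
        have hjlen : jn < s.length := by
          obtain ⟨h, -⟩ := List.getElem?_eq_some_iff.mp hjq; exact h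
        have hnoq : ∀ m, n + 1 ≤ m → m < jn → s[m]? ≠ some '"' := by
          intro m h1 h2 hm
          have hno : ¬ ['"'] <+: (s.drop (n + 1)).drop (m - (n + 1)) := hmin _ (by omega)
          apply hno
          rw [List.drop_drop, singleton_prefix_drop]
          have hidx : n + 1 + (m - (n + 1)) = m := by omega
          rw [hidx]; exact hm
        have hjv : parse_quote s (n : Int) = (jn : Int) := by
          rw [hpq, if_pos hvn]; omega
        have hjget : PySem.List.pyGet? s ((jn : Nat) : Int) = s[jn]? := PySem.List.pyGet?_natCast s jn
        -- A side
        rw [find_comma_goA]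
        simp only [dif_pos hn', hget, hc, hjv]
        rw [if_pos trivial, dif_neg (by omega : ¬ ((jn : Int) = -1))]
        rw [if_neg (by rw [hjget, hjq]; decide)]
        -- B side
        rw [find_comma_goB]
        simp only [dif_pos hn', hget, hc]
        rw [if_pos trivial]
        have h1 : (n : Int) + 1 = ((n + 1 : Nat) : Int) := by push_cast; ring
        rw [h1, Bool.not_false]
        rw [goB_skip s vn (n + 1) (by omega) (fun m a b => hnoq m a (by omega))]
        have h2 : ((n + 1 : Nat) : Int) + ((vn : Nat) : Int) = ((jn : Nat) : Int) := by
          push_cast; omega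
        rw [h2, find_comma_goB]
        simp only [dif_pos (by omega : ((jn : Nat) : Int) < (s.length : Int)), hjget, hjq]
        rw [if_pos trivial]
        have h3 : ((jn : Nat) : Int) + 1 = ((jn + 1 : Nat) : Int) := by push_cast; ring
        rw [h3, Bool.not_true, goA_eq_goB s (jn + 1)]
      case neg =>
        -- no closing quote: A returns -1, B scans to the end with the flag on
        have hvm : v = -1 := by have := PySem.Chars.neg_one_le_find (s.drop (n + 1)) ['"']; omega
        have hnin : ¬ ['"'] <:+: s.drop (n + 1) := (PySem.Chars.find_eq_neg_one_iff _ _).mp hvm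
        have hnoq : ∀ m, n + 1 ≤ m → s[m]? ≠ some '"' := by
          intro m h1 hm
          apply hnin
          have hpre : ['"'] <+: (s.drop (n + 1)).drop (m - (n + 1)) := by
            rw [List.drop_drop, singleton_prefix_drop]
            have hidx : n + 1 + (m - (n + 1)) = m := by omega
            rw [hidx]; exact hm
          have hin : PySem.Chars.isIn ['"'] (s.drop (n + 1)) = true :=
            (PySem.Chars.exists_prefix_drop_iff_isIn _ _).mp ⟨_, hpre⟩
          exact (PySem.Chars.isIn_iff_infix _ _).mp hin
        have hjv : parse_quote s (n : Int) = -1 := by rw [hpq, if_neg hvn]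
        -- A side
        rw [find_comma_goA]
        simp only [dif_pos hn', hget, hc, hjv]
        rw [if_pos trivial, dif_pos trivial]
        -- B side
        rw [find_comma_goB]
        simp only [dif_pos hn', hget, hc]
        rw [if_pos trivial]
        have h1 : (n : Int) + 1 = ((n + 1 : Nat) : Int) := by push_cast; ring
        rw [h1, Bool.not_false]
        rw [goB_skip s (s.length - (n + 1)) (n + 1) (by omega)
          (fun m a _ => hnoq m a)]
        have h2 : ((n + 1 : Nat) : Int) + ((s.length - (n + 1) : Nat) : Int) = (s.length : Int) := by
          push_cast; omega
        rw [h2, find_comma_goB]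
        rw [dif_neg (by omega : ¬ ((s.length : Int) < (s.length : Int)))]
termination_by (s.length - n : Nat)
decreasing_by all_goals omega

-- ===== VERDICT (by name: the statement is the Claim_ definition above) =====
theorem find_comma_spec : Claim_equal_find_comma := by
  intro string i _ hpre
  unfold Spec_find_comma find_comma find_comma_alt
  have : i = ((i.toNat : Nat) : Int) := by
    unfold Pre_find_comma at hpre; omega
  rw [this, goA_eq_goB]
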